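-- pv_equiv track=rewrite | github.com/EmptyLift/HaasoscopePro | software/utils.py | find_longest_zero_stretch
-- ===== SOURCE A (Python) =====
-- def find_longest_zero_stretch(arr, wrap):
--     if wrap: arr = arr+arr # to handle wraparounds
--     max_length = 0
--     current_length = 0
--     start_index = -1
--     current_start = -1
--     for i, num in enumerate(arr):
--         if num == 0:
--             if current_length == 0:
--                 current_start = i
--             current_length += 1
--             if current_length > max_length:
--                 max_length = current_length
--                 start_index = current_start
--         else:
--             current_length = 0
--     return start_index, max_length
-- ===== SOURCE B (Python) =====
-- def find_longest_zero_stretch(arr, wrap):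
--     data = arr + arr if wrap else arr
--     n = len(data)
--     best_start, best_len = -1, 0
--     i = 0
--     while i < n:
--         if data[i] != 0:
--             i += 1
--             continue
--         j = i
--         while j < n and data[j] == 0:
--             j += 1
--         if j - i > best_len:
--             best_start, best_len = i, j - i
--         i = j
--     return best_start, best_len
-- ===== Notes on version B (the rewrite author's own statement) =====
-- stated objective: alternative
-- what changed: Replaces the single element-wise scan carrying four state variables (max/current length, start/current start) with a run-jumping scan: on meeting a zero it measures the whole run with an inner loop, compares it once against the best, and jumps past the run, keeping only (best_start, best_len).
import Mathlib
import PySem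

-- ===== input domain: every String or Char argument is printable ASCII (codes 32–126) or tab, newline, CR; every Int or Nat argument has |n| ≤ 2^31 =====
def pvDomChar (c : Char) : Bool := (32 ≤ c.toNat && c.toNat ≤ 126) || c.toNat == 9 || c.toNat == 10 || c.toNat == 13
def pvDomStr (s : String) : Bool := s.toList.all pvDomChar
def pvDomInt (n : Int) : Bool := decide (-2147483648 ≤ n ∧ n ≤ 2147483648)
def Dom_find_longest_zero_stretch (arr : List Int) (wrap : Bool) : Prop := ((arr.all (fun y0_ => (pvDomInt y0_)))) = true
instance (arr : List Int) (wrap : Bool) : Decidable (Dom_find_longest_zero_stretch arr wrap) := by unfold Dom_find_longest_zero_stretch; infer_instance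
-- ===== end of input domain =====

-- B replaces A's element-wise scan with four state variables by a run-jumping scan that
-- measures each maximal zero run at once and keeps only (best_start, best_len): 'alternative'.

-- ===== PORT A =====
-- enumerate(arr) starting at index i (helper for the literal for-loop port)
def enumFrom (i : Int) : List Int → List (Int × Int)
  | [] => []
  | x :: xs => (i, x) :: enumFrom (i + 1) xs

-- one iteration of A's for-loop body; state = (max_length, current_length, start_index, current_start)
def aStep (st : Int × Int × Int × Int) (p : Int × Int) : Int × Int × Int × Int :=
  let (maxL, curL, startI, curS) := st
  if p.2 = 0 then
    let curS' := if curL = 0 then p.1 else curS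
    let curL' := curL + 1
    if curL' > maxL then (curL', curL', curS', curS') else (maxL, curL', startI, curS')
  else (maxL, 0, startI, curS)

def find_longest_zero_stretch (arr : List Int) (wrap : Bool) : Int × Int :=
  let a := if wrap then arr ++ arr else arr
  let st := (enumFrom 0 a).foldl aStep (0, 0, -1, -1)
  (st.2.2.1, st.1)

-- ===== PORT B =====
-- length of the maximal zero run at the head (B's inner while loop)
def countLeadZeros : List Int → Nat
  | [] => 0
  | x :: xs => if x = 0 then countLeadZeros xs + 1 else 0

-- B's outer loop: on a nonzero, step by one; on a zero, measure the run, compare once, jump past it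
def altGo (l : List Int) (i : Int) (best : Int × Int) : Int × Int :=
  match l with
  | [] => best
  | x :: xs =>
    if x = 0 then
      let k := countLeadZeros xs + 1
      let best' := if (k : Int) > best.2 then (i, (k : Int)) else best
      altGo (xs.drop (k - 1)) (i + k) best'
    else altGo xs (i + 1) best
termination_by l.length
decreasing_by
  · simp only [List.length_drop, List.length_cons]
    omega
  · simp

def find_longest_zero_stretch_alt (arr : List Int) (wrap : Bool) : Int × Int :=
  altGo (if wrap then arr ++ arr else arr) 0 (-1, 0)

-- ===== PRECONDITION & SPEC =====
def Spec_find_longest_zero_stretch (arr : List Int) (wrap : Bool) (out : Int × Int) : Prop := out = find_longest_zero_stretch_alt arr wrap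
instance (arr : List Int) (wrap : Bool) (out : Int × Int) : Decidable (Spec_find_longest_zero_stretch arr wrap out) := by unfold Spec_find_longest_zero_stretch; infer_instance

-- ===== CLAIM (what is proved, stated in full; the proofs are below) =====
def Claim_equal_find_longest_zero_stretch : Prop := ∀ (arr : List Int) (wrap : Bool), Dom_find_longest_zero_stretch arr wrap → Spec_find_longest_zero_stretch arr wrap (find_longest_zero_stretch arr wrap)

-- ===== LEMMAS AND PROOFS =====

lemma take_countLeadZeros (l : List Int) :
    l.take (countLeadZeros l) = List.replicate (countLeadZeros l) 0 := by
  induction l with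
  | nil => simp [countLeadZeros]
  | cons x xs ih =>
    by_cases hx : x = 0
    · subst hx; simp [countLeadZeros, List.replicate, ih]
    · simp [countLeadZeros, hx]

lemma drop_countLeadZeros (l : List Int) :
    (l.drop (countLeadZeros l)).head? = none ∨
      ∃ y ys, l.drop (countLeadZeros l) = y :: ys ∧ y ≠ 0 := by
  induction l with
  | nil => simp [countLeadZeros]
  | cons x xs ih =>
    by_cases hx : x = 0
    · subst hx; simpa [countLeadZeros] using ih
    · right; exact ⟨x, xs, by simp [countLeadZeros, hx], hx⟩

lemma enumFrom_append (i : Int) (a b : List Int) :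
    enumFrom i (a ++ b) = enumFrom i a ++ enumFrom (i + a.length) b := by
  induction a generalizing i with
  | nil => simp [enumFrom]
  | cons x xs ih =>
    simp [enumFrom, ih (i + 1)]
    ring_nf

-- folding A's loop body over a run of k zeros from a state already inside a run
-- (current_length = c ≥ 1, and max_length m already ≥ c, as A maintains)
lemma fold_zeros (k : Nat) (i m c s cs : Int) (hc : 1 ≤ c) (hm : c ≤ m) :
    (enumFrom i (List.replicate k 0)).foldl aStep (m, c, s, cs)
      = (if c + k > m then c + k else m, c + k,
         if c + k > m then cs else s, cs) := by
  induction k generalizing i m c s with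
  | zero =>
    simp only [List.replicate, enumFrom, List.foldl_nil, Nat.cast_zero, add_zero]
    rw [if_neg (by omega), if_neg (by omega)]
  | succ k ih =>
    rw [List.replicate_succ]
    simp only [enumFrom, List.foldl_cons]
    have hstep : aStep (m, c, s, cs) (i, 0)
        = (if c + 1 > m then c + 1 else m, c + 1, if c + 1 > m then cs else s, cs) := by
      have hc0 : ¬ c = 0 := by omega
      simp only [aStep, if_true, if_neg hc0]
      split_ifs <;> rfl
    rw [hstep, ih (i + 1) _ _ _ (by omega) (by split_ifs <;> omega)]
    push_cast
    split_ifs <;> rw [Prod.mk.injEq, Prod.mk.injEq, Prod.mk.injEq] <;> refine ⟨?_, ?_, ?_, ?_⟩ <;> omega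

-- A's scan from a run boundary (current_length = 0) computes B's run-jumping scan
lemma fold_eq_altGo_aux (n : Nat) : ∀ (l : List Int), l.length ≤ n → ∀ (i m s cs : Int),
    (((enumFrom i l).foldl aStep (m, 0, s, cs)).2.2.1,
     ((enumFrom i l).foldl aStep (m, 0, s, cs)).1) = altGo l i (s, m) := by
  induction n with
  | zero =>
    intro l hl i m s cs
    have : l = [] := List.length_eq_zero_iff.mp (Nat.le_zero.mp hl)
    subst this; simp [enumFrom, altGo]
  | succ n ih =>
    intro l hl i m s cs
    match l with
    | [] => simp [enumFrom, altGo]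
    | x :: xs =>
      have hxl : xs.length ≤ n := by simpa using hl
      by_cases hx : x = 0
      · subst hx
        obtain ⟨k0, hk0⟩ : ∃ k, countLeadZeros xs = k := ⟨_, rfl⟩
        have hxs : xs = List.replicate k0 0 ++ xs.drop k0 := by
          conv_lhs => rw [← List.take_append_drop (countLeadZeros xs) xs, take_countLeadZeros]
          rw [hk0]
        rw [altGo, if_pos rfl, hk0]
        simp only [Nat.add_sub_cancel]
        have hstep : aStep (m, 0, s, cs) (i, 0)
            = (if (1:Int) > m then 1 else m, 1, if (1:Int) > m then i else s, i) := by
          simp only [aStep, if_true]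
          norm_num
          split_ifs <;> rfl
        conv_lhs =>
          rw [show enumFrom i ((0:Int) :: xs) = (i, 0) :: enumFrom (i + 1) xs from rfl,
              List.foldl_cons, hstep, hxs, enumFrom_append, List.foldl_append,
              fold_zeros k0 (i + 1) _ 1 _ i (by omega) (by split_ifs <;> omega)]
        simp only [List.length_replicate]
        have hcomb :
            ((if (1:Int) + k0 > (if (1:Int) > m then 1 else m) then (1:Int) + k0
               else (if (1:Int) > m then 1 else m)),
             ((1:Int) + k0),
             (if (1:Int) + k0 > (if (1:Int) > m then 1 else m) then i
               else (if (1:Int) > m then i else s)), i)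
            = ((if ((k0:Int) + 1) > m then (k0:Int) + 1 else m), ((1:Int) + k0),
               (if ((k0:Int) + 1) > m then i else s), i) := by
          split_ifs <;> rw [Prod.mk.injEq, Prod.mk.injEq, Prod.mk.injEq] <;> refine ⟨?_, ?_, ?_, ?_⟩ <;> omega
        rw [hcomb]
        rcases hrest : xs.drop k0 with _ | ⟨y, ys⟩
        · simp only [enumFrom, List.foldl_nil, altGo]
          push_cast
          split_ifs <;> constructor <;> omega
        · have hy : y ≠ 0 := by
            rcases drop_countLeadZeros xs with hnone | ⟨y', ys', hys', hy'⟩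
            · rw [hk0, hrest] at hnone; simp at hnone
            · rw [hk0, hrest] at hys'; cases hys'; exact hy'
          have hstep2 : aStep ((if ((k0:Int) + 1) > m then (k0:Int) + 1 else m,
              (1:Int) + k0, (if ((k0:Int) + 1) > m then i else s), i)) (i + 1 + k0, y)
              = ((if ((k0:Int) + 1) > m then (k0:Int) + 1 else m), 0,
                 (if ((k0:Int) + 1) > m then i else s), i) := by
            simp only [aStep]
            rw [if_neg hy]

          rw [show enumFrom (i + 1 + (k0:Int)) (y :: ys)
                = (i + 1 + (k0:Int), y) :: enumFrom (i + 1 + (k0:Int) + 1) ys from rfl,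
              List.foldl_cons, hstep2]
          have hylen : ys.length ≤ n := by
            have h2 : (List.drop k0 xs).length ≤ xs.length := by simp
            rw [hrest] at h2
            simp at h2
            omega
          rw [ih ys hylen (i + 1 + (k0:Int) + 1) _ _ i, altGo, if_neg hy]
          push_cast
          have e1 : i + 1 + (k0:Int) + 1 = i + ((k0:Int) + 1) + 1 := by ring
          have e2 : ((if (k0:Int) + 1 > m then i else s), (if (k0:Int) + 1 > m then (k0:Int) + 1 else m))
              = (if (k0:Int) + 1 > m then (i, (k0:Int) + 1) else (s, m)) := by
            split_ifs <;> rfl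
          rw [e1, e2]
      · rw [show enumFrom i (x :: xs) = (i, x) :: enumFrom (i + 1) xs from rfl,
            List.foldl_cons]
        have hstep : aStep (m, 0, s, cs) (i, x) = (m, 0, s, cs) := by
          simp only [aStep]; rw [if_neg hx]
        rw [hstep, ih xs hxl (i + 1) m s cs, altGo, if_neg hx]

-- ===== VERDICT (by name: the statement is the Claim_ definition above) =====
theorem find_longest_zero_stretch_spec : Claim_equal_find_longest_zero_stretch := by
  intro arr wrap _
  unfold Spec_find_longest_zero_stretch find_longest_zero_stretch find_longest_zero_stretch_alt
  exact fold_eq_altGo_aux _ _ le_rfl 0 0 (-1) (-1)
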